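-- pv_equiv track=rewrite | github.com/serso/problems | src/main/python/org/solovyev/problems/SawSequencesCount.py | countSawSequences
-- ===== SOURCE A (Python) =====
-- def countSawSequences(n, digits):
--     m = [[[0 for x in range(2)] for x in range(digits)] for x in range(n+1)]
--     # m[n][last][less] - number of saw sequences of length n ending at last
--     # where 'last' is less than number previous to 'last' if 'less' == 0 and more if 'less' == 1
--     for last in range(digits):
--         if last == 0:
--             m[2][0][1] = 0
--         else:
--             m[2][last][1] = m[2][last - 1][1] + (digits - last)
--
--         m[2][digits - last - 1][0] = m[2][last][1]
--
--     for length in range(3, n+1):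
--         for prev in range(digits):
--             for last in range(digits):
--                 if prev > last:
--                     m[length][last][0] += m[length - 1][prev][1]
--                 elif prev < last:
--                     m[length][last][1] += m[length - 1][prev][0]
--
--     return sum(m[n][j][less] for less in range(0, 2) for j in range(0, digits))
-- ===== SOURCE B (Python) =====
-- def countSawSequences(n, digits):
--     # prefix/suffix-sum DP over the previous layer: O(n*digits) instead of O(n*digits^2)
--     if digits <= 0 or n < 2:
--         return 0
--
--     def prefix_excl(xs):
--         out, s = [], 0
--         for x in xs:
--             out.append(s)
--             s += x
--         return out
--
--     up = prefix_excl([digits - 1 - i for i in range(digits)])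
--     down = up[::-1]
--     for _ in range(n - 2):
--         up, down = prefix_excl(down), prefix_excl(up[::-1])[::-1]
--     return sum(up) + sum(down)
-- ===== Notes on version B (the rewrite author's own statement) =====
-- stated objective: faster
-- what changed: B drops A's whole (n+1) x digits x 2 DP table and its inner scan over prev, keeping only the current layer as two lists updated with exclusive prefix/suffix running sums (prefix_excl), so each new layer costs O(digits) instead of O(digits^2).
-- outside the precondition, e.g. on countSawSequences(1, 3): A raises IndexError, B returns 0; on countSawSequences(0, 2): A raises IndexError, B returns 0
import Mathlib
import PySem

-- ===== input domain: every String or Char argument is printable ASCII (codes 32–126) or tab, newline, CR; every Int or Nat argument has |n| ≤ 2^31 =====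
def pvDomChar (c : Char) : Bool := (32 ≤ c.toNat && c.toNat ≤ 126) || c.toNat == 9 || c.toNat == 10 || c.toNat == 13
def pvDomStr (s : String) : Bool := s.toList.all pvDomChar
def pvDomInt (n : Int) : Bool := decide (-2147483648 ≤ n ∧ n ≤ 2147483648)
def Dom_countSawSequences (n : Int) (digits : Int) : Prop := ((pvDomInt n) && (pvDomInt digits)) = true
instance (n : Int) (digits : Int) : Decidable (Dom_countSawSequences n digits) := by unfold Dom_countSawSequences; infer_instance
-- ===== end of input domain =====

-- B replaces A's inner scan over 'prev' by exclusive prefix/suffix sums of the previous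
-- DP layer (objective: faster); equivalence is proved on every input where A returns.

-- ===== PORT A =====
-- A's 3-dimensional list m is ported as List (List (Int × Int)): row i, column j holds
-- (m[i][j][0], m[i][j][1]); Python's in-place element assignments become setFstC/setSndC
-- (every index A touches is in range on every input A accepts, i.e. inside Pre_).
def getC (m : List (List (Int × Int))) (i j : Nat) : Int × Int := (m.getD i []).getD j (0, 0)

def setC (m : List (List (Int × Int))) (i j : Nat) (v : Int × Int) : List (List (Int × Int)) :=
  m.set i ((m.getD i []).set j v)

def setFstC (m : List (List (Int × Int))) (i j : Nat) (v : Int) : List (List (Int × Int)) :=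
  setC m i j (v, (getC m i j).2)

def setSndC (m : List (List (Int × Int))) (i j : Nat) (v : Int) : List (List (Int × Int)) :=
  setC m i j ((getC m i j).1, v)

-- body of 'for last in range(digits)' (the length-2 base layer)
def csBase (digits : Int) (D : Nat) (m : List (List (Int × Int))) (last : Nat) : List (List (Int × Int)) :=
  let m' := if last = 0 then setSndC m 2 0 0
            else setSndC m 2 last ((getC m 2 (last - 1)).2 + (digits - (last : Int)))
  setFstC m' 2 (D - last - 1) ((getC m' 2 last).2)

-- body of the innermost 'for last in range(digits)'
def csLast (length prev : Nat) (m : List (List (Int × Int))) (last : Nat) : List (List (Int × Int)) :=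
  if prev > last then setFstC m length last ((getC m length last).1 + (getC m (length - 1) prev).2)
  else if prev < last then setSndC m length last ((getC m length last).2 + (getC m (length - 1) prev).1)
  else m

-- body of 'for prev in range(digits)'
def csPrev (D length : Nat) (m : List (List (Int × Int))) (prev : Nat) : List (List (Int × Int)) :=
  (List.range D).foldl (csLast length prev) m

-- body of 'for length in range(3, n+1)'
def csLen (D : Nat) (m : List (List (Int × Int))) (length : Nat) : List (List (Int × Int)) :=
  (List.range D).foldl (csPrev D length) m

def countSawSequences (n : Int) (digits : Int) : Int :=
  let D := digits.toNat
  let m0 : List (List (Int × Int)) := List.replicate (n + 1).toNat (List.replicate D ((0 : Int), (0 : Int)))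
  let m1 := (List.range D).foldl (csBase digits D) m0
  let m2 := (List.range' 3 ((n + 1 - 3).toNat)).foldl (csLen D) m1
  -- sum(m[n][j][less] for less in range(0, 2) for j in range(0, digits))
  ((List.range D).map (fun j => (getC m2 n.toNat j).1)).sum
    + ((List.range D).map (fun j => (getC m2 n.toNat j).2)).sum

-- ===== PORT B =====
-- prefix_excl(xs): exclusive running sums, as in Source B (the loop = a foldl carrying (s, out))
def prefixExcl (xs : List Int) : List Int :=
  ((xs.foldl (fun (p : Int × List Int) x => (p.1 + x, p.1 :: p.2)) ((0 : Int), ([] : List Int))).2).reverse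

def countSawSequences_alt (n : Int) (digits : Int) : Int :=
  if digits ≤ 0 || n < 2 then 0
  else
    let up0 := prefixExcl ((List.range digits.toNat).map (fun i : Nat => digits - 1 - (i : Int)))
    let p := (List.range (n - 2).toNat).foldl
      (fun (p : List Int × List Int) _ => (prefixExcl p.2, (prefixExcl p.1.reverse).reverse))
      (up0, up0.reverse)
    p.1.sum + p.2.sum

-- ===== PRECONDITION & SPEC =====
-- Pre_ excludes exactly the inputs where A raises IndexError (digits ≥ 1 and n < 2: the
-- writes to m[2] are out of range there); A returns normally on every input admitted here.
def Pre_countSawSequences (n : Int) (digits : Int) : Prop := digits ≤ 0 ∨ 2 ≤ n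
instance (n : Int) (digits : Int) : Decidable (Pre_countSawSequences n digits) := by
  unfold Pre_countSawSequences; infer_instance

def pvWitness_countSawSequences : Int × Int := (5, 3)

def Spec_countSawSequences (n : Int) (digits : Int) (out : Int) : Prop := out = countSawSequences_alt n digits
instance (n : Int) (digits : Int) (out : Int) : Decidable (Spec_countSawSequences n digits out) := by unfold Spec_countSawSequences; infer_instance

-- ===== CLAIM (what is proved, stated in full; the proofs are below) =====
def Claim_equal_countSawSequences : Prop := ∀ (n : Int) (digits : Int), Dom_countSawSequences n digits → Pre_countSawSequences n digits → Spec_countSawSequences n digits (countSawSequences n digits)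

-- ===== LEMMAS AND PROOFS =====

-- exclusive prefix sums, structurally recursive (reference version of prefixExcl)
def pxe : Int → List Int → List Int
  | _, [] => []
  | s, a :: t => s :: pxe (s + a) t

-- the spec sequences: csU = A's base layer m[2][·][1]; csUD digits D t = the pair
-- (up, down) of DP layer t (layer t corresponds to sequence length t+2)
def csU (digits : Int) : Nat → Int
  | 0 => 0
  | l + 1 => csU digits l + (digits - ((l : Int) + 1))

def csUD (digits : Int) (D : Nat) : Nat → (Nat → Int) × (Nat → Int)
  | 0 => (csU digits, fun j => csU digits (D - 1 - j))
  | t + 1 =>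
    let p := csUD digits D t
    (fun j => ((List.range j).map p.2).sum,
     fun j => ((List.range' (j + 1) (D - (j + 1))).map p.1).sum)

def ShapeM (m : List (List (Int × Int))) (N D : Nat) : Prop :=
  m.length = N ∧ ∀ r ∈ m, r.length = D

-- ---- small utilities ----

theorem pxe_append (s : Int) (xs ys : List Int) :
    pxe s (xs ++ ys) = pxe s xs ++ pxe (s + xs.sum) ys := by
  induction xs generalizing s with
  | nil => simp [pxe]
  | cons a t ih => simp [pxe, ih, add_assoc]

theorem prefixExcl_aux (xs : List Int) : ∀ (s : Int) (acc : List Int),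
    (xs.foldl (fun (p : Int × List Int) x => (p.1 + x, p.1 :: p.2)) (s, acc)).2
      = (pxe s xs).reverse ++ acc := by
  induction xs with
  | nil => intro s acc; simp [pxe]
  | cons a t ih => intro s acc; simp [pxe, ih]

theorem prefixExcl_eq_pxe (xs : List Int) : prefixExcl xs = pxe 0 xs := by
  simp [prefixExcl, prefixExcl_aux]

theorem rev_map_range {α : Type} (f : Nat → α) (D : Nat) :
    ((List.range D).map f).reverse = (List.range D).map (fun i => f (D - 1 - i)) := by
  apply List.ext_getElem (by simp)
  intro i h1 h2
  simp [List.getElem_reverse]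

theorem pxe_map_range (g : Nat → Int) (D : Nat) :
    pxe 0 ((List.range D).map g) = (List.range D).map (fun j => ((List.range j).map g).sum) := by
  induction D with
  | zero => simp [pxe]
  | succ d ih =>
    rw [List.range_succ, List.map_append, pxe_append, ih, List.map_append]
    simp [pxe]

theorem csU_eq_sum (digits : Int) (j : Nat) :
    csU digits j = ((List.range j).map (fun i : Nat => digits - 1 - (i : Int))).sum := by
  induction j with
  | zero => simp [csU]
  | succ l ih =>
    rw [List.range_succ, List.map_append, List.sum_append, ← ih]
    simp [csU]
    ring

theorem sum_ite_lt (f : Nat → Int) (j D : Nat) (hj : j ≤ D) :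
    (((List.range D).map (fun p => if p < j then f p else 0)).sum)
      = ((List.range j).map f).sum := by
  obtain ⟨k, rfl⟩ : ∃ k, D = j + k := ⟨D - j, by omega⟩
  rw [List.range_add, List.map_append, List.sum_append, List.map_map]
  have h1 : ((List.range j).map (fun p => if p < j then f p else 0)) = (List.range j).map f :=
    List.map_congr_left fun p hp => by simp [List.mem_range.mp hp]
  have h2 : (((List.range k).map ((fun p => if p < j then f p else 0) ∘ fun x => j + x)).sum) = 0 :=
    List.sum_eq_zero fun x hx => by
      obtain ⟨q, hq, rfl⟩ := List.mem_map.mp hx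
      simp [Function.comp]
  rw [h1, h2, add_zero]

theorem sum_ite_gt (f : Nat → Int) (j D : Nat) :
    (((List.range D).map (fun p => if j < p then f p else 0)).sum)
      = ((List.range' (j + 1) (D - (j + 1))).map f).sum := by
  by_cases hD : D ≤ j
  · have h0 : D - (j + 1) = 0 := by omega
    rw [h0]
    simp only [List.range'_zero, List.map_nil, List.sum_nil]
    exact List.sum_eq_zero fun x hx => by
      obtain ⟨p, hp, rfl⟩ := List.mem_map.mp hx
      have := List.mem_range.mp hp
      simp [show ¬ j < p by omega]
  · obtain ⟨k, rfl⟩ : ∃ k, D = (j + 1) + k := ⟨D - (j + 1), by omega⟩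
    rw [List.range_add, List.map_append, List.sum_append, List.map_map]
    have h1 : (((List.range (j + 1)).map (fun p => if j < p then f p else 0)).sum) = 0 :=
      List.sum_eq_zero fun x hx => by
        obtain ⟨p, hp, rfl⟩ := List.mem_map.mp hx
        have := List.mem_range.mp hp
        simp [show ¬ j < p by omega]
    have h2 : ((List.range k).map ((fun p => if j < p then f p else 0) ∘ fun x => (j + 1) + x))
        = (List.range k).map (fun x => f ((j + 1) + x)) :=
      List.map_congr_left fun q hq => by simp [Function.comp, show j < j + 1 + q by omega]
    rw [h1, h2, zero_add, show (j + 1) + k - (j + 1) = k by omega, List.range'_eq_map_range,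
      List.map_map]
    rfl

theorem sum_rev_tail (u : Nat → Int) (D j : Nat) (hj : j < D) :
    ((List.range (D - 1 - j)).map (fun i => u (D - 1 - i))).sum
      = ((List.range' (j + 1) (D - (j + 1))).map u).sum := by
  rw [← List.sum_reverse (((List.range' (j + 1) (D - (j + 1))).map u)), ← List.map_reverse,
    List.reverse_range', List.map_map]
  refine congrArg _ ?_
  have hk : D - (j + 1) = D - 1 - j := by omega
  rw [hk]
  exact (List.map_congr_left fun a ha => by
    have := List.mem_range.mp ha
    simp only [Function.comp]
    congr 1
    omega).symm

-- ---- matrix get/set lemmas ----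

theorem row_len {m : List (List (Int × Int))} {N D i : Nat}
    (hm : ShapeM m N D) (hi : i < N) : (m.getD i []).length = D := by
  obtain ⟨h1, h2⟩ := hm
  have hi' : i < m.length := by omega
  rw [List.getD_eq_getElem?_getD, List.getElem?_eq_getElem hi']
  exact h2 _ (List.getElem_mem hi')

theorem shape_setC {m : List (List (Int × Int))} {N D i j : Nat} {v : Int × Int}
    (hm : ShapeM m N D) (hi : i < N) : ShapeM (setC m i j v) N D := by
  refine ⟨by simp [setC, List.length_set, hm.1], fun r hr => ?_⟩
  rcases List.mem_or_eq_of_mem_set hr with h | rfl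
  · exact hm.2 _ h
  · rw [List.length_set]
    exact row_len hm hi

theorem getC_setC_self {m : List (List (Int × Int))} {N D i j : Nat} {v : Int × Int}
    (hm : ShapeM m N D) (hi : i < N) (hj : j < D) : getC (setC m i j v) i j = v := by
  have h1 := hm.1
  have hi' : i < m.length := by omega
  have hrow := row_len hm hi
  rw [List.getD_eq_getElem?_getD] at hrow
  simp only [getC, setC, List.getD_eq_getElem?_getD]
  rw [List.getElem?_set_self hi', Option.getD_some, List.getElem?_set_self (by omega),
    Option.getD_some]

theorem getC_setC_ne {m : List (List (Int × Int))} {i j i' j' : Nat} {v : Int × Int}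
    (h : i' ≠ i ∨ j' ≠ j) : getC (setC m i j v) i' j' = getC m i' j' := by
  simp only [getC, setC, List.getD_eq_getElem?_getD, List.getElem?_set]
  by_cases hii : i = i'
  · subst hii
    have hjj : j' ≠ j := h.resolve_left (by simp)
    by_cases hl : i < m.length
    · simp [hl, hjj.symm]
    · simp [hl]
  · simp [hii]

theorem shape_setFstC {m : List (List (Int × Int))} {N D i j : Nat} {v : Int}
    (hm : ShapeM m N D) (hi : i < N) : ShapeM (setFstC m i j v) N D := by
  simp only [setFstC]; exact shape_setC hm hi

theorem shape_setSndC {m : List (List (Int × Int))} {N D i j : Nat} {v : Int}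
    (hm : ShapeM m N D) (hi : i < N) : ShapeM (setSndC m i j v) N D := by
  simp only [setSndC]; exact shape_setC hm hi

theorem getC_setFstC_self {m : List (List (Int × Int))} {N D i j : Nat} {v : Int}
    (hm : ShapeM m N D) (hi : i < N) (hj : j < D) :
    getC (setFstC m i j v) i j = (v, (getC m i j).2) := by
  simp only [setFstC]; exact getC_setC_self hm hi hj

theorem getC_setSndC_self {m : List (List (Int × Int))} {N D i j : Nat} {v : Int}
    (hm : ShapeM m N D) (hi : i < N) (hj : j < D) :
    getC (setSndC m i j v) i j = ((getC m i j).1, v) := by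
  simp only [setSndC]; exact getC_setC_self hm hi hj

theorem getC_setFstC_ne {m : List (List (Int × Int))} {i j i' j' : Nat} {v : Int}
    (h : i' ≠ i ∨ j' ≠ j) : getC (setFstC m i j v) i' j' = getC m i' j' := by
  simp only [setFstC]; exact getC_setC_ne h

theorem getC_setSndC_ne {m : List (List (Int × Int))} {i j i' j' : Nat} {v : Int}
    (h : i' ≠ i ∨ j' ≠ j) : getC (setSndC m i j v) i' j' = getC m i' j' := by
  simp only [setSndC]; exact getC_setC_ne h

-- ---- A-side fold characterizations ----

theorem csBase_fold (digits : Int) (N D : Nat) (hN : 3 ≤ N) :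
    ∀ k, k ≤ D →
      ShapeM ((List.range k).foldl (csBase digits D) (List.replicate N (List.replicate D ((0 : Int), (0 : Int))))) N D ∧
      ∀ i j, i < N → j < D →
        getC ((List.range k).foldl (csBase digits D) (List.replicate N (List.replicate D ((0 : Int), (0 : Int))))) i j
          = (if i = 2 ∧ D - k ≤ j then csU digits (D - 1 - j) else 0,
             if i = 2 ∧ j < k then csU digits j else 0) := by
  have h2N : 2 < N := by omega
  intro k
  induction k with
  | zero =>
    intro _
    constructor
    · refine ⟨by simp, fun r hr => ?_⟩
      rw [List.eq_of_mem_replicate hr]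
      simp
    · intro i j hi hj
      simp only [List.range_zero, List.foldl_nil, getC, List.getD_eq_getElem?_getD,
        List.getElem?_replicate, if_pos hi, Option.getD_some, if_pos hj]
      rw [if_neg (by omega), if_neg (by omega)]
  | succ k ih =>
    intro hk1
    obtain ⟨ihS, ihG⟩ := ih (by omega)
    have hkD : k < D := by omega
    rw [List.range_succ, List.foldl_append, List.foldl_cons, List.foldl_nil]
    set M := (List.range k).foldl (csBase digits D) (List.replicate N (List.replicate D ((0 : Int), (0 : Int)))) with hM
    simp only [csBase]
    set W := (if k = 0 then setSndC M 2 0 0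
              else setSndC M 2 k ((getC M 2 (k - 1)).2 + (digits - (k : Int)))) with hW
    have hWS : ShapeM W N D := by
      rw [hW]; split <;> exact shape_setSndC ihS h2N
    have hWsnd : ∀ i j, i < N → j < D → getC W i j =
        ((if i = 2 ∧ D - k ≤ j then csU digits (D - 1 - j) else 0),
         (if i = 2 ∧ j < k + 1 then csU digits j else 0)) := by
      intro i j hi hj
      by_cases h0 : k = 0
      · subst h0
        rw [hW, if_pos rfl]
        by_cases hij : i = 2 ∧ j = 0
        · obtain ⟨h2, hj0⟩ := hij
          subst h2; subst hj0
          rw [getC_setSndC_self ihS h2N hj, ihG 2 0 h2N hj]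
          refine congrArg₂ Prod.mk rfl ?_
          rw [if_pos (by omega)]
          simp [csU]
        · rw [getC_setSndC_ne (by omega), ihG i j hi hj]
          refine congrArg₂ Prod.mk rfl ?_
          split_ifs with ha hb <;> first | rfl | omega
      · rw [hW, if_neg h0]
        by_cases hij : i = 2 ∧ j = k
        · obtain ⟨h2, hjk⟩ := hij
          subst h2; subst hjk
          have hcs : csU digits j = csU digits (j - 1) + (digits - (j : Int)) := by
            conv_lhs => rw [show j = (j - 1) + 1 by omega]
            rw [csU]
            congr 1
            omega
          rw [getC_setSndC_self ihS h2N hkD, ihG 2 (j - 1) h2N (by omega), ihG 2 j h2N hkD]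
          dsimp only
          refine congrArg₂ Prod.mk rfl ?_
          rw [if_pos (by omega), if_pos (by omega), hcs]
        · rw [getC_setSndC_ne (by omega), ihG i j hi hj]
          refine congrArg₂ Prod.mk rfl ?_
          split_ifs with ha <;> first | rfl | omega
    have hv : (getC W 2 k).2 = csU digits k := by
      rw [hWsnd 2 k h2N hkD]
      dsimp only
      rw [if_pos (by omega)]
    refine ⟨shape_setFstC hWS h2N, fun i j hi hj => ?_⟩
    by_cases hij : i = 2 ∧ j = D - k - 1
    · obtain ⟨h2, hjk⟩ := hij
      subst h2; subst hjk
      rw [getC_setFstC_self hWS h2N (by omega), hv, hWsnd 2 (D - k - 1) h2N (by omega)]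
      dsimp only
      refine congrArg₂ Prod.mk ?_ ?_
      · rw [if_pos (by omega)]
        congr 1
        omega
      · split_ifs with ha <;> rfl
    · rw [getC_setFstC_ne (by omega), hWsnd i j hi hj]
      refine congrArg₂ Prod.mk ?_ rfl
      split_ifs with ha hb <;> first | rfl | omega

theorem csLast_fold (N D len prev : Nat) (h3 : 3 ≤ len) (hlN : len < N) (hpD : prev < D)
    (m : List (List (Int × Int))) (hm : ShapeM m N D) :
    ∀ k, k ≤ D →
      ShapeM ((List.range k).foldl (csLast len prev) m) N D ∧
      ∀ i j, i < N → j < D →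
        getC ((List.range k).foldl (csLast len prev) m) i j
          = if i = len ∧ j < k then
              ((getC m len j).1 + (if j < prev then (getC m (len - 1) prev).2 else 0),
               (getC m len j).2 + (if prev < j then (getC m (len - 1) prev).1 else 0))
            else getC m i j := by
  intro k
  induction k with
  | zero =>
    intro _
    refine ⟨hm, fun i j hi hj => ?_⟩
    rw [if_neg (by omega)]
    simp
  | succ k ih =>
    intro hk1
    obtain ⟨ihS, ihG⟩ := ih (by omega)
    have hkD : k < D := by omega
    rw [List.range_succ, List.foldl_append, List.foldl_cons, List.foldl_nil]
    set M := (List.range k).foldl (csLast len prev) m with hM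
    have hRd1 : getC M len k = getC m len k := by
      rw [ihG len k hlN hkD, if_neg (by omega)]
    have hRd2 : getC M (len - 1) prev = getC m (len - 1) prev := by
      rw [ihG (len - 1) prev (by omega) hpD, if_neg (by omega)]
    simp only [csLast]
    split_ifs with hgt hlt
    · -- prev > k : fst write at (len, k)
      refine ⟨shape_setFstC ihS hlN, fun i j hi hj => ?_⟩
      by_cases hij : i = len ∧ j = k
      · obtain ⟨h2, hjk⟩ := hij
        subst h2; subst hjk
        rw [getC_setFstC_self ihS hlN hkD, hRd1, hRd2, if_pos (by omega), if_pos (by omega),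
          if_neg (by omega)]
        simp
      · rw [getC_setFstC_ne (by omega), ihG i j hi hj]
        split_ifs with ha hb <;> first | rfl | omega
    · -- prev < k : snd write at (len, k)
      refine ⟨shape_setSndC ihS hlN, fun i j hi hj => ?_⟩
      by_cases hij : i = len ∧ j = k
      · obtain ⟨h2, hjk⟩ := hij
        subst h2; subst hjk
        rw [getC_setSndC_self ihS hlN hkD, hRd1, hRd2, if_pos (by omega), if_neg (by omega),
          if_pos (by omega)]
        simp
      · rw [getC_setSndC_ne (by omega), ihG i j hi hj]
        split_ifs with ha hb <;> first | rfl | omega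
    · -- prev = k : no write
      refine ⟨ihS, fun i j hi hj => ?_⟩
      rw [ihG i j hi hj]
      by_cases hij : i = len ∧ j = k
      · obtain ⟨h2, hjk⟩ := hij
        subst h2; subst hjk
        rw [if_neg (by omega), if_pos (by omega), if_neg (by omega), if_neg (by omega)]
        simp
      · split_ifs with ha hb <;> first | rfl | omega

theorem csPrev_fold (N D len : Nat) (h3 : 3 ≤ len) (hlN : len < N)
    (m : List (List (Int × Int))) (hm : ShapeM m N D) :
    ∀ K, K ≤ D →
      ShapeM ((List.range K).foldl (csPrev D len) m) N D ∧
      ∀ i j, i < N → j < D →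
        getC ((List.range K).foldl (csPrev D len) m) i j
          = if i = len then
              ((getC m len j).1 + ((List.range K).map (fun p => if j < p then (getC m (len - 1) p).2 else 0)).sum,
               (getC m len j).2 + ((List.range K).map (fun p => if p < j then (getC m (len - 1) p).1 else 0)).sum)
            else getC m i j := by
  intro K
  induction K with
  | zero =>
    intro _
    refine ⟨hm, fun i j hi hj => ?_⟩
    split_ifs with hi2
    · subst hi2; simp
    · rfl
  | succ K ih =>
    intro hK1
    obtain ⟨ihS, ihG⟩ := ih (by omega)
    have hKD : K < D := by omega
    rw [List.range_succ, List.foldl_append, List.foldl_cons, List.foldl_nil]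
    set M := (List.range K).foldl (csPrev D len) m with hM
    obtain ⟨stS, stG⟩ := csLast_fold N D len K h3 hlN hKD M ihS D le_rfl
    refine ⟨stS, fun i j hi hj => ?_⟩
    rw [show csPrev D len M K = (List.range D).foldl (csLast len K) M from rfl, stG i j hi hj]
    have hcol : getC M (len - 1) K = getC m (len - 1) K := by
      rw [ihG (len - 1) K (by omega) hKD, if_neg (by omega)]
    by_cases hi2 : i = len
    · subst hi2
      rw [if_pos ⟨rfl, hj⟩, ihG i j hlN hj, if_pos rfl, hcol, if_pos rfl]
      refine congrArg₂ Prod.mk ?_ ?_ <;>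
        (rw [List.map_append, List.sum_append]; simp; ring)
    · rw [if_neg (by omega), ihG i j hi hj, if_neg hi2, if_neg hi2]

theorem csLen_fold (digits : Int) (N D : Nat) (hN : 3 ≤ N) (_hD : 1 ≤ D) :
    ∀ t, t ≤ N - 3 →
      ShapeM ((List.range' 3 t).foldl (csLen D)
          ((List.range D).foldl (csBase digits D) (List.replicate N (List.replicate D ((0 : Int), (0 : Int)))))) N D ∧
      ∀ i j, i < N → j < D →
        getC ((List.range' 3 t).foldl (csLen D)
            ((List.range D).foldl (csBase digits D) (List.replicate N (List.replicate D ((0 : Int), (0 : Int)))))) i j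
          = if 2 ≤ i ∧ i ≤ t + 2 then ((csUD digits D (i - 2)).2 j, (csUD digits D (i - 2)).1 j)
            else (0, 0) := by
  intro t
  induction t with
  | zero =>
    intro _
    obtain ⟨bS, bG⟩ := csBase_fold digits N D hN D le_rfl
    refine ⟨bS, fun i j hi hj => ?_⟩
    rw [List.range'_zero, List.foldl_nil, bG i j hi hj]
    by_cases hi2 : i = 2
    · subst hi2
      rw [if_pos (show (2 : Nat) = 2 ∧ D - D ≤ j by omega),
        if_pos (show (2 : Nat) = 2 ∧ j < D by omega),
        if_pos (show 2 ≤ 2 ∧ 2 ≤ 0 + 2 by omega)]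
      show (csU digits (D - 1 - j), csU digits j) = ((csUD digits D 0).2 j, (csUD digits D 0).1 j)
      simp [csUD]
    · rw [if_neg (by omega), if_neg (by omega), if_neg (by omega)]
  | succ t ih =>
    intro ht1
    obtain ⟨ihS, ihG⟩ := ih (by omega)
    rw [List.range'_concat, List.foldl_append, List.foldl_cons, List.foldl_nil]
    set M := (List.range' 3 t).foldl (csLen D)
        ((List.range D).foldl (csBase digits D) (List.replicate N (List.replicate D ((0 : Int), (0 : Int))))) with hM
    have hlN : 3 + 1 * t < N := by omega
    obtain ⟨pS, pG⟩ := csPrev_fold N D (3 + 1 * t) (by omega) hlN M ihS D le_rfl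
    refine ⟨pS, fun i j hi hj => ?_⟩
    rw [show csLen D M (3 + 1 * t) = (List.range D).foldl (csPrev D (3 + 1 * t)) M from rfl]
    rw [pG i j hi hj]
    have hrow0 : getC M (3 + 1 * t) j = (0, 0) := by
      rw [ihG (3 + 1 * t) j hlN hj, if_neg (by omega)]
    by_cases hi2 : i = 3 + 1 * t
    · subst hi2
      rw [if_pos rfl, hrow0]
      have hprevrow : ∀ p, p < D →
          getC M (3 + 1 * t - 1) p = ((csUD digits D (t + 1 - 1)).2 p, (csUD digits D (t + 1 - 1)).1 p) := by
        intro p hp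
        rw [ihG (3 + 1 * t - 1) p (by omega) hp, if_pos (by omega)]
        have : 3 + 1 * t - 1 - 2 = t + 1 - 1 := by omega
        rw [this]
      have e1 : ((List.range D).map (fun p => if j < p then (getC M (3 + 1 * t - 1) p).2 else 0)).sum
          = ((List.range D).map (fun p => if j < p then (csUD digits D t).1 p else 0)).sum := by
        refine congrArg _ (List.map_congr_left fun p hp => ?_)
        rw [hprevrow p (List.mem_range.mp hp)]
        simp
      have e2 : ((List.range D).map (fun p => if p < j then (getC M (3 + 1 * t - 1) p).1 else 0)).sum
          = ((List.range D).map (fun p => if p < j then (csUD digits D t).2 p else 0)).sum := by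
        refine congrArg _ (List.map_congr_left fun p hp => ?_)
        rw [hprevrow p (List.mem_range.mp hp)]
        simp
      rw [e1, e2, sum_ite_gt ((csUD digits D t).1) j D, sum_ite_lt ((csUD digits D t).2) j D (by omega)]
      rw [if_pos (by omega)]
      have hidx : 3 + 1 * t - 2 = t + 1 := by omega
      rw [hidx]
      simp only [csUD]
      refine congrArg₂ Prod.mk (by ring) (by ring)
    · rw [if_neg hi2, ihG i j hi hj]
      split_ifs with ha hb <;> first | rfl | omega

-- ---- B-side fold characterizations ----

theorem alt_step (digits : Int) (D t : Nat) :
    (prefixExcl ((List.range D).map (csUD digits D t).2),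
      (prefixExcl ((List.range D).map (csUD digits D t).1).reverse).reverse)
    = ((List.range D).map (csUD digits D (t + 1)).1,
       (List.range D).map (csUD digits D (t + 1)).2) := by
  refine congrArg₂ Prod.mk ?_ ?_
  · rw [prefixExcl_eq_pxe, pxe_map_range]
    exact List.map_congr_left fun j _ => by simp [csUD]
  · rw [rev_map_range, prefixExcl_eq_pxe, pxe_map_range, rev_map_range]
    refine List.map_congr_left fun j hj => ?_
    have hjD := List.mem_range.mp hj
    rw [sum_rev_tail ((csUD digits D t).1) D j hjD]
    simp [csUD]

theorem alt_fold (digits : Int) (D : Nat) : ∀ t,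
    (List.range t).foldl
        (fun (p : List Int × List Int) _ => (prefixExcl p.2, (prefixExcl p.1.reverse).reverse))
        ((List.range D).map (csUD digits D 0).1, (List.range D).map (csUD digits D 0).2)
      = ((List.range D).map (csUD digits D t).1, (List.range D).map (csUD digits D t).2) := by
  intro t
  induction t with
  | zero => simp
  | succ t ih =>
    rw [List.range_succ, List.foldl_append, ih, List.foldl_cons, List.foldl_nil]
    exact alt_step digits D t

theorem alt_base (digits : Int) :
    prefixExcl ((List.range digits.toNat).map (fun i : Nat => digits - 1 - (i : Int)))
      = (List.range digits.toNat).map (csUD digits digits.toNat 0).1 := by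
  rw [prefixExcl_eq_pxe, pxe_map_range]
  exact List.map_congr_left fun j _ => by simp [csUD, csU_eq_sum]

-- ===== VERDICT (by name: the statement is the Claim_ definition above) =====
theorem countSawSequences_spec : Claim_equal_countSawSequences := by
  intro n digits _ hPre
  unfold Spec_countSawSequences
  by_cases hd : digits ≤ 0
  · have hD0 : digits.toNat = 0 := by omega
    have hA : countSawSequences n digits = 0 := by
      simp only [countSawSequences, hD0, List.range_zero, List.foldl_nil, List.map_nil,
        List.sum_nil, add_zero]
    have hB : countSawSequences_alt n digits = 0 := by
      simp [countSawSequences_alt, hd]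
    rw [hA, hB]
  · have hn2 : 2 ≤ n := by
      rcases hPre with h | h
      · omega
      · exact h
    have hDpos : 1 ≤ digits.toNat := by omega
    have hN3 : 3 ≤ (n + 1).toNat := by omega
    have hT : (n + 1 - 3).toNat = (n + 1).toNat - 3 := by omega
    have hnt : n.toNat = ((n + 1).toNat - 3) + 2 := by omega
    have hT' : (n - 2).toNat = (n + 1).toNat - 3 := by omega
    obtain ⟨_, hG⟩ := csLen_fold digits ((n + 1).toNat) digits.toNat hN3 hDpos
      ((n + 1).toNat - 3) le_rfl
    have hA : countSawSequences n digits =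
        ((List.range digits.toNat).map (fun j => (csUD digits digits.toNat ((n + 1).toNat - 3)).2 j)).sum
          + ((List.range digits.toNat).map (fun j => (csUD digits digits.toNat ((n + 1).toNat - 3)).1 j)).sum := by
      simp only [countSawSequences]
      rw [hT, hnt]
      refine congrArg₂ (· + ·) ?_ ?_ <;>
        refine congrArg _ (List.map_congr_left fun j hj => ?_) <;>
        rw [hG (((n + 1).toNat - 3) + 2) j (by omega) (List.mem_range.mp hj), if_pos (by omega)] <;>
        rfl
    have hB : countSawSequences_alt n digits =
        ((List.range digits.toNat).map ((csUD digits digits.toNat ((n + 1).toNat - 3)).1)).sum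
          + ((List.range digits.toNat).map ((csUD digits digits.toNat ((n + 1).toNat - 3)).2)).sum := by
      simp only [countSawSequences_alt]
      rw [if_neg (by simp; omega)]
      have hrev : ((List.range digits.toNat).map ((csUD digits digits.toNat 0).1)).reverse
          = (List.range digits.toNat).map ((csUD digits digits.toNat 0).2) := by
        rw [rev_map_range]
        exact List.map_congr_left fun a _ => rfl
      rw [alt_base digits, hrev, hT', alt_fold digits digits.toNat ((n + 1).toNat - 3)]
    rw [hA, hB]
    exact add_comm _ _
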